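-- pv_equiv track=rewrite | github.com/wuqihang-brave/El-druin | backend/intelligence/ontology_forecaster.py | _compose_step
-- ===== SOURCE A (Python) =====
-- from typing import Any, Dict, List, Optional, Tuple
--
-- def _compose_step(
--     active: List[str],
--     composition_table: Dict[Tuple[str, str], str],
-- ) -> List[str]:
--     """
--     Perform one composition step: for each pair (A, B) in active patterns,
--     if compose(A, B) = C exists in the composition table, add C to the new active set.
--     Returns the deduplicated new active set (sorted for determinism).
--     """
--     new_active = set(active)
--     for pa in active:
--         for pb in active:
--             result = composition_table.get((pa, pb))
--             if result:
--                 new_active.add(result)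
--     return sorted(new_active)
-- ===== SOURCE B (Python) =====
-- def _compose_step(active, composition_table):
--     active_set = set(active)
--     new_active = set(active)
--     for (pa, pb), result in composition_table.items():
--         if result and pa in active_set and pb in active_set:
--             new_active.add(result)
--     return sorted(new_active)
-- ===== Notes on version B (the rewrite author's own statement) =====
-- stated objective: faster
-- what changed: Instead of probing the dict for every pair of active patterns (O(n^2) lookups), B makes one pass over the composition table's entries and keeps an entry's result when both its key components are in the active set.
import Mathlib
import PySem

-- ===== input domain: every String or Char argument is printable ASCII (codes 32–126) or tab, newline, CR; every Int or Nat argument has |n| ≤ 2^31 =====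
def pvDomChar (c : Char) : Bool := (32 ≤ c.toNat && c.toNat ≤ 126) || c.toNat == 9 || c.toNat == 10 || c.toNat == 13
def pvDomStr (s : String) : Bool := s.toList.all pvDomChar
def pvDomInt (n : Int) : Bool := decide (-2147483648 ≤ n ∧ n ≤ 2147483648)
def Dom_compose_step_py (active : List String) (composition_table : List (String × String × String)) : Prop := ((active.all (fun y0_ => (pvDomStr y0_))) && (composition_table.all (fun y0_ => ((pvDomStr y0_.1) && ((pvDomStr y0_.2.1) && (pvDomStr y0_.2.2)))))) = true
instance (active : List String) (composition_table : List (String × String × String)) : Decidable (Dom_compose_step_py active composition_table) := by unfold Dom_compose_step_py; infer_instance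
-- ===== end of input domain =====

-- B replaces A's O(n^2) scan over all pairs of active patterns by one pass over the
-- composition table, keeping entries whose two key components are both active.

-- ===== PORT A =====
-- dict.get((pa, pb)) on the association list: first entry whose key matches (first match).
def pvLookupAB (t : List (String × String × String)) (pa pb : String) : Option String :=
  match t with
  | [] => none
  | (a, b, c) :: rest => if a = pa ∧ b = pb then some c else pvLookupAB rest pa pb

def compose_step_py (active : List String) (composition_table : List (String × String × String)) : List String :=
  -- new_active = set(active)
  let init : PySem.Set String := PySem.Set.ofList active
  -- for pa in active: for pb in active: result = table.get((pa,pb)); if result: new_active.add(result)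
  let new_active :=
    active.foldl (fun s pa =>
      active.foldl (fun s pb =>
        match pvLookupAB composition_table pa pb with
        | some result => if result ≠ "" then PySem.Set.add s result else s
        | none => s) s) init
  PySem.List.sorted new_active (fun x => x) false

-- ===== PORT B =====
def compose_step_py_alt (active : List String) (composition_table : List (String × String × String)) : List String :=
  let active_set : PySem.Set String := PySem.Set.ofList active
  let new_active :=
    composition_table.foldl (fun s e =>
      if e.2.2 ≠ "" ∧ PySem.Set.contains active_set e.1 ∧ PySem.Set.contains active_set e.2.1
      then PySem.Set.add s e.2.2 else s) (PySem.Set.ofList active)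
  PySem.List.sorted new_active (fun x => x) false

-- ===== PRECONDITION & SPEC =====
-- Pre_ excludes association lists whose (pa, pb) keys repeat: a Python dict cannot
-- contain duplicate keys, so every actual Python input is admitted.
def Pre_compose_step_py (active : List String) (composition_table : List (String × String × String)) : Prop :=
  (composition_table.map (fun e => (e.1, e.2.1))).Nodup

instance (active : List String) (composition_table : List (String × String × String)) : Decidable (Pre_compose_step_py active composition_table) := by unfold Pre_compose_step_py; infer_instance

def pvWitness_compose_step_py : List String × (List (String × String × String)) :=
  (["a", "b"], [("a", "b", "c"), ("b", "a", "")])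

def Spec_compose_step_py (active : List String) (composition_table : List (String × String × String)) (out : List String) : Prop := out = compose_step_py_alt active composition_table
instance (active : List String) (composition_table : List (String × String × String)) (out : List String) : Decidable (Spec_compose_step_py active composition_table out) := by unfold Spec_compose_step_py; infer_instance

-- ===== CLAIM (what is proved, stated in full; the proofs are below) =====
def Claim_equal_compose_step_py : Prop := ∀ (active : List String) (composition_table : List (String × String × String)), Dom_compose_step_py active composition_table → Pre_compose_step_py active composition_table → Spec_compose_step_py active composition_table (compose_step_py active composition_table)

-- ===== LEMMAS AND PROOFS =====

-- membership in A's inner fold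
theorem mem_inner_fold (t : List (String × String × String)) (pa : String)
    (l : List String) (s : PySem.Set String) (x : String) :
    x ∈ l.foldl (fun s pb =>
        match pvLookupAB t pa pb with
        | some result => if result ≠ "" then PySem.Set.add s result else s
        | none => s) s ↔
      x ∈ s ∨ ∃ pb ∈ l, pvLookupAB t pa pb = some x ∧ x ≠ "" := by
  induction l generalizing s with
  | nil => simp
  | cons hd tl ih =>
    simp only [List.foldl_cons, ih, List.mem_cons]
    cases h : pvLookupAB t pa hd with
    | none => aesop
    | some c =>
      by_cases hc : c = ""
      · subst hc; simp only [ne_eq, not_true_eq_false, if_false]; aesop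
      · simp only [ne_eq, hc, not_false_iff, if_true, PySem.Set.mem_add]; aesop

theorem mem_outer_fold (t : List (String × String × String)) (active : List String)
    (l : List String) (s : PySem.Set String) (x : String) :
    x ∈ l.foldl (fun s pa =>
        active.foldl (fun s pb =>
          match pvLookupAB t pa pb with
          | some result => if result ≠ "" then PySem.Set.add s result else s
          | none => s) s) s ↔
      x ∈ s ∨ ∃ pa ∈ l, ∃ pb ∈ active, pvLookupAB t pa pb = some x ∧ x ≠ "" := by
  induction l generalizing s with
  | nil => simp
  | cons hd tl ih =>
    simp only [List.foldl_cons, ih, mem_inner_fold, List.mem_cons]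
    aesop

-- membership in B's fold
theorem mem_b_fold (aset : PySem.Set String) (l : List (String × String × String))
    (s : PySem.Set String) (x : String) :
    x ∈ l.foldl (fun s e =>
        if e.2.2 ≠ "" ∧ PySem.Set.contains aset e.1 ∧ PySem.Set.contains aset e.2.1
        then PySem.Set.add s e.2.2 else s) s ↔
      x ∈ s ∨ ∃ e ∈ l, e.2.2 = x ∧ e.2.2 ≠ "" ∧ e.1 ∈ aset ∧ e.2.1 ∈ aset := by
  induction l generalizing s with
  | nil => simp
  | cons hd tl ih =>
    simp only [List.foldl_cons, ih, List.mem_cons]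
    by_cases hc : hd.2.2 ≠ "" ∧ PySem.Set.contains aset hd.1 ∧ PySem.Set.contains aset hd.2.1
    · simp only [if_pos hc, PySem.Set.mem_add]
      have h2 := (PySem.Set.contains_iff aset hd.1).1 hc.2.1
      have h3 := (PySem.Set.contains_iff aset hd.2.1).1 hc.2.2
      have h1 := hc.1
      aesop
    · simp only [if_neg hc]
      rw [not_and_or, not_and_or] at hc
      simp only [PySem.Set.contains_iff] at hc
      aesop

theorem lookup_some_mem (t : List (String × String × String)) (pa pb c : String)
    (h : pvLookupAB t pa pb = some c) : (pa, pb, c) ∈ t := by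
  induction t with
  | nil => simp [pvLookupAB] at h
  | cons hd tl ih =>
    obtain ⟨a, b, v⟩ := hd
    simp only [pvLookupAB] at h
    split_ifs at h with hab
    · obtain ⟨rfl, rfl⟩ := hab
      simp [Option.some.inj h]
    · exact List.mem_cons_of_mem _ (ih h)

theorem mem_lookup_some (t : List (String × String × String)) (pa pb c : String)
    (hnd : (t.map (fun e => (e.1, e.2.1))).Nodup)
    (h : (pa, pb, c) ∈ t) : pvLookupAB t pa pb = some c := by
  induction t with
  | nil => simp at h
  | cons hd tl ih =>
    obtain ⟨a, b, v⟩ := hd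
    simp only [List.map_cons, List.nodup_cons] at hnd
    rcases List.mem_cons.1 h with heq | hmem
    · obtain ⟨rfl, rfl, rfl⟩ : a = pa ∧ b = pb ∧ v = c := by
        simpa [Prod.ext_iff, eq_comm] using heq
      simp [pvLookupAB]
    · simp only [pvLookupAB]
      split_ifs with hab
      · obtain ⟨rfl, rfl⟩ := hab
        exact absurd (List.mem_map.2 ⟨(a, b, c), hmem, rfl⟩) hnd.1
      · exact ih hnd.2 hmem

-- nodup of the folds
theorem nodup_inner_fold (t : List (String × String × String)) (pa : String)
    (l : List String) (s : PySem.Set String) (hs : s.Nodup) :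
    (l.foldl (fun s pb =>
        match pvLookupAB t pa pb with
        | some result => if result ≠ "" then PySem.Set.add s result else s
        | none => s) s).Nodup := by
  induction l generalizing s with
  | nil => exact hs
  | cons hd tl ih =>
    simp only [List.foldl_cons]
    apply ih
    cases pvLookupAB t pa hd with
    | none => exact hs
    | some c =>
      by_cases hc : c ≠ ""
      · simpa [hc] using PySem.Set.nodup_add s c hs
      · simpa [hc] using hs

theorem nodup_outer_fold (t : List (String × String × String)) (active : List String)
    (l : List String) (s : PySem.Set String) (hs : s.Nodup) :
    (l.foldl (fun s pa =>
        active.foldl (fun s pb =>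
          match pvLookupAB t pa pb with
          | some result => if result ≠ "" then PySem.Set.add s result else s
          | none => s) s) s).Nodup := by
  induction l generalizing s with
  | nil => exact hs
  | cons hd tl ih =>
    exact ih _ (nodup_inner_fold t hd active s hs)

theorem nodup_b_fold (aset : PySem.Set String) (l : List (String × String × String))
    (s : PySem.Set String) (hs : s.Nodup) :
    (l.foldl (fun s e =>
        if e.2.2 ≠ "" ∧ PySem.Set.contains aset e.1 ∧ PySem.Set.contains aset e.2.1
        then PySem.Set.add s e.2.2 else s) s).Nodup := by
  induction l generalizing s with
  | nil => exact hs
  | cons hd tl ih =>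
    simp only [List.foldl_cons]
    apply ih
    split_ifs with hc
    · exact PySem.Set.nodup_add _ _ hs
    · exact hs

-- ===== VERDICT (by name: the statement is the Claim_ definition above) =====
theorem compose_step_py_spec : Claim_equal_compose_step_py := by
  intro active t _hdom hpre
  unfold Spec_compose_step_py compose_step_py compose_step_py_alt
  simp only []
  apply PySem.List.sorted_eq_sorted_of_perm _ _ _ (fun a b h => h)
  apply (List.perm_ext_iff_of_nodup
    (nodup_outer_fold t active active _ (PySem.Set.nodup_ofList active))
    (nodup_b_fold _ t _ (PySem.Set.nodup_ofList active))).2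
  intro x
  rw [mem_outer_fold, mem_b_fold]
  constructor
  · rintro (hx | ⟨pa, hpa, pb, hpb, hl, hne⟩)
    · exact Or.inl hx
    · exact Or.inr ⟨(pa, pb, x), lookup_some_mem t pa pb x hl, rfl, hne,
        (PySem.Set.mem_ofList _ _).2 hpa, (PySem.Set.mem_ofList _ _).2 hpb⟩
  · rintro (hx | ⟨⟨pa, pb, c⟩, he, rfl, hne, h1, h2⟩)
    · exact Or.inl hx
    · exact Or.inr ⟨pa, (PySem.Set.mem_ofList _ _).1 h1, pb, (PySem.Set.mem_ofList _ _).1 h2,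
        mem_lookup_some t pa pb c hpre he, hne⟩
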